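-- pv_equiv track=rewrite | github.com/DimaZzZz101/Yandex_Practicum_Algorithms | Sprint_8/Practice/G/search_with_shift.py | find
-- ===== SOURCE A (Python) =====
-- def find(search, pattern, start):
--     result = -1
--
--     if start >= len(search):
--         return result
--
--     if len(search) - start < len(pattern):
--         return result
--
--     for pos in range(start, len(search) - len(pattern) + 1):
--         shift = None
--         match = True
--
--         for offset in range(len(pattern)):
--             if shift is None:
--                 shift = pattern[offset] - search[pos]
--
--             if search[pos + offset] + shift != pattern[offset]:
--                 match = False
--                 break
--
--         if match:
--             result = pos + 1
--             break
--
--     return result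
-- ===== SOURCE B (Python) =====
-- def find(search, pattern, start):
--     n, m = len(search), len(pattern)
--     if start >= n or n - start < m:
--         return -1
--     first = max(start, 0)
--     if m <= 1:
--         return first + 1
--     dp = [pattern[i + 1] - pattern[i] for i in range(m - 1)]
--     ds = [search[i + 1] - search[i] for i in range(n - 1)]
--     for p in range(first, n - m + 1):
--         if ds[p:p + m - 1] == dp:
--             return p + 1
--     return -1
-- ===== Notes on version B (the rewrite author's own statement) =====
-- stated objective: alternative
-- what changed: B replaces A's per-window shift-and-compare inner loop by a one-time reduction of both lists to difference sequences (a window matches up to a constant shift iff consecutive differences agree) and then scans for the first slice of search's diffs equal to pattern's diffs, with empty/singleton patterns answered directly.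
-- outside the precondition, e.g. on find([1, 2], [5], -1): A returns 0, B returns 1; on find([1], [1, 2], -5): A raises IndexError, B returns -1
import Mathlib
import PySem

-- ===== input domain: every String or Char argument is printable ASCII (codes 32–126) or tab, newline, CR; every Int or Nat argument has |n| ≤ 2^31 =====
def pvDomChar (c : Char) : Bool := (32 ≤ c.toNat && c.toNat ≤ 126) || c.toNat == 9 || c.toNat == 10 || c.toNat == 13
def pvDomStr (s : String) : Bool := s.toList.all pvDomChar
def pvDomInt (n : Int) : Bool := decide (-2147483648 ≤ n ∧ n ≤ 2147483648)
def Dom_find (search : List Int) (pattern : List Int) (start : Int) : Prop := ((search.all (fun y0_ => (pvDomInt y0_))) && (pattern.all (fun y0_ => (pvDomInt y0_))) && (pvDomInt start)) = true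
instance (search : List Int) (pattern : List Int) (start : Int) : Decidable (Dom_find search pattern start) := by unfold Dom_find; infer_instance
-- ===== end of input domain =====

-- B replaces A's per-window shift-and-compare inner loop by a one-time reduction to
-- difference sequences (window matches up to a constant shift iff consecutive
-- differences agree), then scans for the first slice of diffs equal to the pattern's
-- diffs; objective: alternative (same worst-case order, different algorithmics).

-- ===== PORT A =====
def findInner (search : List Int) (pattern : List Int) (pos : Int)
    (offsets : List Int) (shift : Option Int) : Bool :=
  match offsets with
  | [] => true
  | off :: rest =>
      let sh := shift.getD (PySem.List.pyGetD pattern off 0 - PySem.List.pyGetD search pos 0)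
      if PySem.List.pyGetD search (pos + off) 0 + sh ≠ PySem.List.pyGetD pattern off 0 then false
      else findInner search pattern pos rest (some sh)

def findOuter (search : List Int) (pattern : List Int) (positions : List Int) : Int :=
  match positions with
  | [] => -1
  | pos :: rest =>
      if findInner search pattern pos (PySem.List.pyRange 0 (pattern.length : Int) 1) none then pos + 1
      else findOuter search pattern rest

def find (search : List Int) (pattern : List Int) (start : Int) : Int :=
  if start ≥ (search.length : Int) then -1
  else if (search.length : Int) - start < (pattern.length : Int) then -1
  else findOuter search pattern
        (PySem.List.pyRange start ((search.length : Int) - (pattern.length : Int) + 1) 1)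

-- ===== PORT B =====
def diffs (xs : List Int) : List Int :=
  (PySem.List.pyRange 0 ((xs.length : Int) - 1) 1).map
    (fun i => PySem.List.pyGetD xs (i + 1) 0 - PySem.List.pyGetD xs i 0)

def altScan (ds : List Int) (dp : List Int) (m : Int) (ps : List Int) : Int :=
  match ps with
  | [] => -1
  | p :: rest =>
      if PySem.List.slice ds (some p) (some (p + m - 1)) = dp then p + 1
      else altScan ds dp m rest

def find_alt (search : List Int) (pattern : List Int) (start : Int) : Int :=
  if start ≥ (search.length : Int) ∨ (search.length : Int) - start < (pattern.length : Int) then -1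
  else if (pattern.length : Int) ≤ 1 then max start 0 + 1
  else altScan (diffs search) (diffs pattern) (pattern.length : Int)
        (PySem.List.pyRange (max start 0) ((search.length : Int) - (pattern.length : Int) + 1) 1)

-- ===== PRECONDITION & SPEC =====
-- Pre_ excludes negative start (a scan start index's natural domain is 0 ≤ start, and A
-- accepts any int): there A either raises IndexError (start < -len(search) with a nonempty
-- pattern that fits) or compares windows assembled through Python's negative-index
-- wraparound and can return an accidental position ≤ 0; B simply scans from index 0.
def Pre_find (search : List Int) (pattern : List Int) (start : Int) : Prop :=
  0 ≤ start
instance (search : List Int) (pattern : List Int) (start : Int) : Decidable (Pre_find search pattern start) := by unfold Pre_find; infer_instance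
def pvWitness_find : List Int × List Int × Int := ([1, 2, 3], [4, 6], 0)

def Spec_find (search : List Int) (pattern : List Int) (start : Int) (out : Int) : Prop := out = find_alt search pattern start
instance (search : List Int) (pattern : List Int) (start : Int) (out : Int) : Decidable (Spec_find search pattern start out) := by unfold Spec_find; infer_instance

-- ===== CLAIM (what is proved, stated in full; the proofs are below) =====
def Claim_equal_find : Prop := ∀ (search : List Int) (pattern : List Int) (start : Int), Dom_find search pattern start → Pre_find search pattern start → Spec_find search pattern start (find search pattern start)

-- ===== LEMMAS AND PROOFS =====

-- A's inner-loop matching condition at window position pos (proof-side characterisation)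
def pvShiftMatch (search : List Int) (pattern : List Int) (pos : Int) : Prop :=
  ∀ j ∈ PySem.List.pyRange 0 (pattern.length : Int) 1,
    PySem.List.pyGetD search (pos + j) 0 +
      (PySem.List.pyGetD pattern 0 0 - PySem.List.pyGetD search pos 0) =
      PySem.List.pyGetD pattern j 0

theorem findInner_some_iff (search pattern : List Int) (pos sh : Int) (offs : List Int) :
    findInner search pattern pos offs (some sh) = true ↔
      ∀ off ∈ offs, PySem.List.pyGetD search (pos + off) 0 + sh = PySem.List.pyGetD pattern off 0 := by
  induction offs with
  | nil => simp [findInner]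
  | cons o rest ih =>
      by_cases h : PySem.List.pyGetD search (pos + o) 0 + sh = PySem.List.pyGetD pattern o 0
      · simp [findInner, h, ih]
      · simp [findInner, h]

theorem findInner_none_iff (search pattern : List Int) (pos : Int) :
    findInner search pattern pos (PySem.List.pyRange 0 (pattern.length : Int) 1) none = true ↔
      pvShiftMatch search pattern pos := by
  unfold pvShiftMatch
  rcases Nat.eq_zero_or_pos pattern.length with h | h
  · rw [h]
    simp [PySem.List.pyRange_one_eq_nil, findInner]
  · rw [PySem.List.pyRange_one_cons (by exact_mod_cast h)]
    simp [findInner, findInner_some_iff]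

theorem scan_agree (search pattern ds dp : List Int) (m : Int) (ps : List Int)
    (h : ∀ p ∈ ps,
      (findInner search pattern p (PySem.List.pyRange 0 (pattern.length : Int) 1) none = true) ↔
        (PySem.List.slice ds (some p) (some (p + m - 1)) = dp)) :
    findOuter search pattern ps = altScan ds dp m ps := by
  induction ps with
  | nil => rfl
  | cons p rest ih =>
      have hp := h p (by simp)
      by_cases hc : findInner search pattern p (PySem.List.pyRange 0 (pattern.length : Int) 1) none = true
      · simp [findOuter, altScan, hc, hp.mp hc]
      · have : ¬ (PySem.List.slice ds (some p) (some (p + m - 1)) = dp) := fun hs => hc (hp.mpr hs)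
        simp [findOuter, altScan, hc, this]
        exact ih (fun q hq => h q (by simp [hq]))

theorem telescope (f g : Nat → Int) (m : Nat) :
    (∀ j < m, f j + (g 0 - f 0) = g j) ↔
      (∀ i, i + 1 < m → f (i + 1) - f i = g (i + 1) - g i) := by
  constructor
  · intro h i hi
    have h1 := h i (by omega)
    have h2 := h (i + 1) hi
    omega
  · intro h j hj
    induction j with
    | zero => omega
    | succ i ih =>
        have h1 := h i hj
        have h2 := ih (by omega)
        omega

theorem diffs_length (xs : List Int) : (diffs xs).length = xs.length - 1 := by
  simp [diffs, PySem.List.length_pyRange_one]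

theorem diffs_getElem (xs : List Int) (k : Nat) (hk : k < xs.length - 1) :
    (diffs xs)[k]'(by rw [diffs_length]; omega) =
      PySem.List.pyGetD xs ((k : Int) + 1) 0 - PySem.List.pyGetD xs (k : Int) 0 := by
  simp [diffs, List.getElem_map, PySem.List.getElem_pyRange_one]

theorem diffWindow_iff (search pattern : List Int) (q : Nat) (hm : 2 ≤ pattern.length)
    (hq : q + pattern.length ≤ search.length) :
    pvShiftMatch search pattern (q : Int) ↔
      PySem.List.slice (diffs search) (some (q : Int))
        (some ((q : Int) + (pattern.length : Int) - 1)) = diffs pattern := by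
  have hb : (q : Int) + (pattern.length : Int) - 1
      = (q : Int) + ((pattern.length - 1 : Nat) : Int) := by
    push_cast [Nat.cast_sub (by omega : 1 ≤ pattern.length)]
    ring
  rw [hb, PySem.List.slice_natCast_add]
  have hNat : pvShiftMatch search pattern (q : Int) ↔
      (∀ j < pattern.length,
        (fun j : Nat => PySem.List.pyGetD search ((q + j : Nat) : Int) 0) j +
          ((fun j : Nat => PySem.List.pyGetD pattern (j : Int) 0) 0 -
            (fun j : Nat => PySem.List.pyGetD search ((q + j : Nat) : Int) 0) 0) =
          (fun j : Nat => PySem.List.pyGetD pattern (j : Int) 0) j) := by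
    unfold pvShiftMatch
    simp only [Nat.cast_zero, Nat.add_zero]
    constructor
    · intro h j hj
      have := h (j : Int) (by
        rw [PySem.List.mem_pyRange_one]
        exact ⟨Int.natCast_nonneg j, by exact_mod_cast hj⟩)
      rw [Nat.cast_add]
      exact this
    · intro h j hjmem
      rw [PySem.List.mem_pyRange_one] at hjmem
      obtain ⟨h0, hlt⟩ := hjmem
      lift j to Nat using h0 with jn
      have := h jn (by exact_mod_cast hlt)
      rw [Nat.cast_add] at this
      exact this
  rw [hNat, telescope (fun j : Nat => PySem.List.pyGetD search ((q + j : Nat) : Int) 0)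
      (fun j : Nat => PySem.List.pyGetD pattern (j : Int) 0) pattern.length]
  constructor
  · intro h
    apply List.ext_getElem
    · simp [List.length_take, List.length_drop, diffs_length]
      omega
    · intro i h1 h2
      have hi : i < pattern.length - 1 := by
        simpa [diffs_length] using h2
      rw [List.getElem_take, List.getElem_drop, diffs_getElem search (q + i) (by omega),
          diffs_getElem pattern i (by omega)]
      have := h i (by omega)
      push_cast at this ⊢
      ring_nf at this ⊢
      linarith [this]
  · intro h i hi
    have hlen1 : i < (((diffs search).drop q).take (pattern.length - 1)).length := by
      simp [List.length_take, List.length_drop, diffs_length]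
      omega
    have := List.getElem_of_eq h (i := i) hlen1
    rw [List.getElem_take, List.getElem_drop, diffs_getElem search (q + i) (by omega),
        diffs_getElem pattern i (by omega)] at this
    push_cast at this ⊢
    ring_nf at this ⊢
    linarith [this]

theorem shiftMatch_small (search pattern : List Int) (hm : pattern.length ≤ 1) (pos : Int) :
    pvShiftMatch search pattern pos := by
  intro j hj
  rw [PySem.List.mem_pyRange_one] at hj
  have hm' : (pattern.length : Int) ≤ 1 := by exact_mod_cast hm
  have : j = 0 := by omega
  subst this
  simp only [add_zero, add_sub_cancel]

theorem findOuter_first_match (search pattern : List Int) (start b : Int)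
    (hlt : start < b) (hmatch : pvShiftMatch search pattern start) :
    findOuter search pattern (PySem.List.pyRange start b 1) = start + 1 := by
  rw [PySem.List.pyRange_one_cons hlt]
  have h := (findInner_none_iff search pattern start).mpr hmatch
  simp [findOuter, h]

theorem main_eq (search pattern : List Int) (start : Int) (hstart : 0 ≤ start) :
    find search pattern start = find_alt search pattern start := by
  unfold find find_alt
  by_cases h1 : start ≥ (search.length : Int)
  · simp [h1]
  by_cases h2 : (search.length : Int) - start < (pattern.length : Int)
  · simp [h1, h2]
  rw [if_neg h1, if_neg h2, if_neg (by tauto : ¬ (start ≥ (search.length : Int) ∨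
      (search.length : Int) - start < (pattern.length : Int)))]
  rcases Nat.lt_or_ge pattern.length 2 with hm | hm
  · -- pattern of length ≤ 1: the very first window matches
    have hm1 : pattern.length ≤ 1 := by omega
    have hmi : (pattern.length : Int) ≤ 1 := by exact_mod_cast hm1
    rw [if_pos hmi, findOuter_first_match search pattern start _ (by omega)
        (shiftMatch_small search pattern hm1 start), max_eq_left hstart]
  · -- pattern of length ≥ 2: position by position, A's test agrees with the diff-slice test
    have hmi : ¬ (pattern.length : Int) ≤ 1 := by
      exact_mod_cast Nat.not_le.mpr (by omega : 1 < pattern.length)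
    rw [if_neg hmi, max_eq_left hstart]
    apply scan_agree
    intro p hp
    rw [PySem.List.mem_pyRange_one] at hp
    obtain ⟨hp0, hpn⟩ := hp
    lift p to Nat using (by omega : (0:Int) ≤ p) with q
    rw [findInner_none_iff]
    exact diffWindow_iff search pattern q hm (by omega)

theorem find_spec : Claim_equal_find := by
  intro search pattern start _ hpre
  exact main_eq search pattern start hpre
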